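-- pv_equiv track=rewrite | github.com/feifanphys/QDRE | DotArray.py | count_fermion
-- ===== SOURCE A (Python) =====
-- def count_fermion(n, stop):
--     count = 0
--     copy = n
--     i = 0
--     while (i < stop):
--         count += copy & 1
--         copy >>= 1
--         i += 1
--     return count
-- ===== SOURCE B (Python) =====
-- def count_fermion(n, stop):
--     # Count set bits among the low `stop` bits of n (Kernighan: one step per set bit).
--     if stop <= 0:
--         return 0
--     masked = n & ((1 << stop) - 1)
--     count = 0
--     while masked:
--         masked &= masked - 1
--         count += 1
--     return count
-- ===== Notes on version B (the rewrite author's own statement) =====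
-- stated objective: faster
-- what changed: Instead of looping once per bit position shifting and testing each bit, B masks off the low stop bits in one bitwise operation and counts them with Brian Kernighan's clear-lowest-set-bit loop, iterating only once per set bit.
import Mathlib
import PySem

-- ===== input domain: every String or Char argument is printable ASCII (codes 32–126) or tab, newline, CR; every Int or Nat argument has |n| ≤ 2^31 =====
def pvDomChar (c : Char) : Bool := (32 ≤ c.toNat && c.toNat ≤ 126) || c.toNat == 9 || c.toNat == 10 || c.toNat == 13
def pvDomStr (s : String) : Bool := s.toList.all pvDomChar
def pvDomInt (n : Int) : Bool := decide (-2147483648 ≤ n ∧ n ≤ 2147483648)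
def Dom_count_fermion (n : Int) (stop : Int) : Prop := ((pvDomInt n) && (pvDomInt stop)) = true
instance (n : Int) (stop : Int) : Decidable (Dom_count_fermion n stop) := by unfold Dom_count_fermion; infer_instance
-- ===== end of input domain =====

-- B replaces A's per-bit-position shift-and-test loop by masking off the low `stop`
-- bits and counting them with Kernighan's clear-lowest-set-bit loop (one iteration
-- per set bit).

-- ===== PORT A =====
-- while (i < stop): count += copy & 1; copy >>= 1; i += 1  — runs max(stop,0) times
def cfLoopA : Nat → Int → Int → Int
  | 0, _, count => count
  | f + 1, copy, count => cfLoopA f (copy >>> 1) (count + PySem.Int.band copy 1)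

def count_fermion (n : Int) (stop : Int) : Int := cfLoopA stop.toNat n 0

-- ===== PORT B =====
-- while masked: masked &= masked - 1; count += 1  — fuel masked.toNat suffices since
-- masked strictly decreases each iteration (the fuel only makes the loop total)
def kernLoop : Nat → Int → Int → Int
  | 0, _, count => count
  | f + 1, m, count =>
    if m = 0 then count else kernLoop f (PySem.Int.band m (m - 1)) (count + 1)

def count_fermion_alt (n : Int) (stop : Int) : Int :=
  if stop ≤ 0 then 0
  else
    let masked : Int := PySem.Int.band n ((1 <<< stop.toNat) - 1)
    kernLoop masked.toNat masked 0

-- ===== PRECONDITION & SPEC =====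
def Spec_count_fermion (n : Int) (stop : Int) (out : Int) : Prop := out = count_fermion_alt n stop
instance (n : Int) (stop : Int) (out : Int) : Decidable (Spec_count_fermion n stop out) := by unfold Spec_count_fermion; infer_instance

-- ===== CLAIM (what is proved, stated in full; the proofs are below) =====
def Claim_equal_count_fermion : Prop := ∀ (n : Int) (stop : Int), Dom_count_fermion n stop → Spec_count_fermion n stop (count_fermion n stop)

-- ===== LEMMAS AND PROOFS =====

-- Python identity: a & (2^k - 1) = a mod 2^k, also for negative a
theorem band_mask (a : Int) (k : Nat) :
    PySem.Int.band a ((2 : Int) ^ k - 1) = a % 2 ^ k := by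
  have hb : (0 : Int) < 2 ^ k := by positivity
  have hbn : ((2 ^ k - 1 : Int)).toNat = 2 ^ k - 1 := by
    have : ((2 : Int) ^ k) = ((2 ^ k : Nat) : Int) := by push_cast; ring
    omega
  by_cases ha : 0 ≤ a
  · rw [PySem.Int.band, if_pos ha, if_pos (by omega)]
    rw [hbn, Nat.and_two_pow_sub_one_eq_mod]
    have h1 : ((a.toNat : Int)) = a := Int.toNat_of_nonneg ha
    have h2 : ((2 ^ k : Nat) : Int) = (2 : Int) ^ k := by push_cast; ring
    calc ((a.toNat % 2 ^ k : Nat) : Int)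
        = (a.toNat : Int) % ((2 ^ k : Nat) : Int) := by push_cast; ring
      _ = a % 2 ^ k := by rw [h1, h2]
  · rw [PySem.Int.band, if_neg ha, if_pos (by omega)]
    set x : Nat := (-a - 1).toNat with hx
    have hxa : (x : Int) = -a - 1 := Int.toNat_of_nonneg (by omega)
    rw [hbn, Nat.land_comm, Nat.and_two_pow_sub_one_eq_mod]
    have hr : x % 2 ^ k < 2 ^ k := Nat.mod_lt _ (by positivity)
    have hrI : ((x % 2 ^ k : Nat) : Int) < 2 ^ k := by exact_mod_cast hr
    have hr0 : (0 : Int) ≤ ((x % 2 ^ k : Nat) : Int) := Int.natCast_nonneg _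
    have hdecomp : ((x % 2 ^ k : Nat) : Int) = (x : Int) % 2 ^ k := by push_cast; ring
    have hxq : (2 : Int) ^ k * ((x : Int) / 2 ^ k) + (x : Int) % 2 ^ k = x :=
      Int.mul_ediv_add_emod _ _
    -- a % 2^k = 2^k - 1 - (x % 2^k)
    have key : a % 2 ^ k = 2 ^ k - 1 - ((x % 2 ^ k : Nat) : Int) := by
      have h := (Int.ediv_emod_unique (a := a) (b := 2 ^ k)
        (r := 2 ^ k - 1 - ((x % 2 ^ k : Nat) : Int))
        (q := -((x : Int) / 2 ^ k) - 1) hb).mpr ⟨by rw [hdecomp]; linarith, by omega, by omega⟩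
      exact h.2
    omega

-- bitCount halving on nonnegative Ints
theorem bitCount_halving (m : Int) (hm : 0 ≤ m) :
    PySem.Int.bitCount m = (m % 2).toNat + PySem.Int.bitCount (m / 2) := by
  rcases eq_or_lt_of_le hm with h | h
  · simp [← h, PySem.Int.bitCount_zero]
  · have hrec := PySem.Int.bitCount_of_pos h
    have hmod : PySem.Int.mod m 2 = m % 2 := by
      show m.fmod 2 = m % 2
      rw [Int.fmod_eq_emod]; simp
    have hdiv : PySem.Int.floordiv m 2 = m / 2 := by
      show m.fdiv 2 = m / 2
      rw [Int.fdiv_eq_ediv]; simp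
    rw [hrec, hmod, hdiv]

-- A's loop computes bitCount (copy mod 2^k)
theorem cfLoopA_eq (k : Nat) : ∀ (copy c : Int),
    cfLoopA k copy c = c + (PySem.Int.bitCount (copy % 2 ^ k) : Int) := by
  induction k with
  | zero => intro copy c; simp [cfLoopA, PySem.Int.bitCount_zero]
  | succ k ih =>
    intro copy c
    have hb : (0 : Int) < 2 ^ (k + 1) := by positivity
    set m : Int := copy % 2 ^ (k + 1) with hm
    have hm0 : 0 ≤ m := Int.emod_nonneg _ (by positivity)
    have hmlt : m < 2 ^ (k + 1) := Int.emod_lt_of_pos _ hb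
    have hband : PySem.Int.band copy 1 = copy % 2 := by
      have := band_mask copy 1; simpa using this
    have hshift : copy >>> (1 : Int) = copy / 2 := by
      rw [← Nat.cast_one (R := Int), Int.shiftRight_natCast_right,
        Int.shiftRight_eq_div_pow]
      norm_num
    have hmod2 : copy % 2 = m % 2 := by
      rw [hm, Int.emod_emod_of_dvd copy ⟨2 ^ k, by ring⟩]
    have hdivmod : (copy / 2) % 2 ^ k = m / 2 := by
      have key : ∀ P : Int, 0 < P → (copy / 2) % P = (copy % (2 * P)) / 2 := by
        intro P hP
        have h := Int.mul_ediv_add_emod copy (2 * P)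
        have hm0' : 0 ≤ copy % (2 * P) := Int.emod_nonneg _ (by positivity)
        have hmlt' : copy % (2 * P) < 2 * P := Int.emod_lt_of_pos _ (by positivity)
        have hc : copy = copy % (2 * P) + P * (copy / (2 * P)) * 2 := by linarith
        have h2 : copy / 2 = (copy % (2 * P)) / 2 + P * (copy / (2 * P)) := by
          conv_lhs => rw [hc]
          rw [Int.add_mul_ediv_right _ _ (by norm_num : (2 : Int) ≠ 0)]
        rw [h2, Int.add_mul_emod_self_left,
          Int.emod_eq_of_lt (by positivity) (by omega)]
      have h3 := key (2 ^ k) (by positivity)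
      rw [hm, (by ring : (2 : Int) ^ (k + 1) = 2 * 2 ^ k)]
      exact h3
    show cfLoopA k (copy >>> 1) (c + PySem.Int.band copy 1) = _
    rw [ih, hband, hshift, hdivmod, hmod2, bitCount_halving m hm0]
    have hmm : (0 : Int) ≤ m % 2 := Int.emod_nonneg _ (by norm_num)
    push_cast
    omega

theorem bitCount_two_mul (x : Nat) :
    PySem.Int.bitCount ((2 * x : Nat) : Int) = PySem.Int.bitCount (x : Int) := by
  rcases Nat.eq_zero_or_pos x with h | h
  · simp [h]
  · rw [PySem.Int.bitCount_natCast (by omega : 0 < 2 * x)]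
    simp [Nat.mul_div_cancel_left _ (by norm_num : 0 < 2), Nat.mul_mod_right]

-- Kernighan's step: clearing the lowest set bit decreases the value and
-- removes exactly one set bit
theorem kernighan_step : ∀ t : Nat, 0 < t →
    t &&& (t - 1) < t ∧
    PySem.Int.bitCount ((t &&& (t - 1) : Nat) : Int) + 1 = PySem.Int.bitCount (t : Int) := by
  intro t
  induction t using Nat.strong_induction_on with
  | _ t ih =>
    intro ht
    rcases Nat.even_or_odd t with ⟨q, hq⟩ | ⟨q, hq⟩
    · -- t = 2q, q > 0
      have hq0 : 0 < q := by omega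
      have hsub : t - 1 = 2 * (q - 1) + 1 := by omega
      have hland : t &&& (t - 1) = 2 * (q &&& (q - 1)) := by
        rw [hsub, (by omega : t = 2 * q)]
        show Nat.bitwise and (Nat.bit false q) (Nat.bit true (q - 1)) = _
        rw [Nat.bitwise_bit]
        simp [Nat.bit]
        rfl
      obtain ⟨ihlt, ihbc⟩ := ih q (by omega) hq0
      refine ⟨by omega, ?_⟩
      rw [hland, bitCount_two_mul, ihbc, (by omega : t = 2 * q), bitCount_two_mul]
    · -- t = 2q + 1
      have hsub : t - 1 = 2 * q := by omega
      have hland : t &&& (t - 1) = 2 * q := by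
        rw [hsub, hq]
        show Nat.bitwise and (Nat.bit true q) (Nat.bit false q) = _
        rw [Nat.bitwise_bit]
        simp [Nat.bit]
        exact Nat.and_self q
      refine ⟨by omega, ?_⟩
      rw [hland, bitCount_two_mul, hq,
        PySem.Int.bitCount_natCast (by omega : 0 < 2 * q + 1)]
      have h1 : (2 * q + 1) % 2 = 1 := by omega
      have h2 : (2 * q + 1) / 2 = q := by omega
      rw [h1, h2]
      omega

-- B's loop computes bitCount m given enough fuel
theorem kernLoop_eq : ∀ (f : Nat) (m c : Int), 0 ≤ m → m.toNat ≤ f →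
    kernLoop f m c = c + (PySem.Int.bitCount m : Int) := by
  intro f
  induction f with
  | zero =>
    intro m c hm hf
    have h0 : m = 0 := by omega
    simp [h0, kernLoop, PySem.Int.bitCount_zero]
  | succ f ih =>
    intro m c hm hf
    by_cases h0 : m = 0
    · simp [h0, kernLoop, PySem.Int.bitCount_zero]
    · set t : Nat := m.toNat with htdef
      have ht0 : 0 < t := by omega
      have hband : PySem.Int.band m (m - 1) = ((t &&& (t - 1) : Nat) : Int) := by
        rw [PySem.Int.band_of_nonneg hm (by omega)]
        congr 2
        omega
      obtain ⟨hlt, hbc⟩ := kernighan_step t ht0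
      have hrec : kernLoop (f + 1) m c = kernLoop f (PySem.Int.band m (m - 1)) (c + 1) := by
        simp [kernLoop, h0]
      rw [hrec, hband, ih _ _ (Int.natCast_nonneg _) (by omega)]
      have hmt : m = ((t : Nat) : Int) := by
        rw [htdef]; exact (Int.toNat_of_nonneg hm).symm
      rw [hmt]
      omega

-- ===== VERDICT (by name: the statement is the Claim_ definition above) =====
theorem count_fermion_spec : Claim_equal_count_fermion := by
  intro n stop _
  show count_fermion n stop = count_fermion_alt n stop
  by_cases hs : stop ≤ 0
  · have h0 : stop.toNat = 0 := by omega
    rw [count_fermion, count_fermion_alt, if_pos hs, h0]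
    rfl
  · rw [count_fermion, count_fermion_alt, if_neg hs]
    set k := stop.toNat with hk
    have hmask : PySem.Int.band n (((1 <<< k : Nat) : Int) - 1) = n % 2 ^ k := by
      have h1 : ((1 <<< k : Nat) : Int) = 2 ^ k := by
        rw [Nat.shiftLeft_eq]; push_cast; ring
      rw [h1]
      have := band_mask n k
      simpa using this
    have hM0 : 0 ≤ n % 2 ^ k := Int.emod_nonneg _ (by positivity)
    show cfLoopA k n 0 = kernLoop _ _ 0
    rw [hmask, kernLoop_eq _ _ _ hM0 le_rfl, cfLoopA_eq]
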